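-- pv_equiv track=rewrite | github.com/Shinya-Kouda/kgc | [valid]mytest_token_sort.py | add_segment_ids
-- ===== SOURCE A (Python) =====
-- def add_segment_ids(ids):
--     kg_segment_ids = [0]
--     for i in range(len(ids)):
--         if ids[i][0] == '[' and ids[i][-1] == ']':
--             kg_segment_ids.append(kg_segment_ids[-1]+1)
--         else:
--             kg_segment_ids.append(kg_segment_ids[-1])
--     return (ids, kg_segment_ids[1:])
-- ===== SOURCE B (Python) =====
-- def add_segment_ids(ids):
--     # Run-length construction: collect positions of bracketed tokens once,
--     # then emit constant blocks between consecutive bracket positions.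
--     n = len(ids)
--     pos = [i for i in range(n) if ids[i][0] == '[' and ids[i][-1] == ']']
--     seg = []
--     prev = 0
--     for k, p in enumerate(pos):
--         seg += [k] * (p - prev)
--         prev = p
--     seg += [len(pos)] * (n - prev)
--     return (ids, seg)
-- ===== Notes on version B (the rewrite author's own statement) =====
-- stated objective: alternative
-- what changed: Replaces A's token-by-token accumulator loop (append last or last+1 per token) with a run-length construction: one pass collects the positions of bracketed tokens, then the result is emitted as constant blocks between consecutive bracket positions.
-- outside the precondition, e.g. on add_segment_ids(['[a]', '']): A raises IndexError, B raises IndexError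
import Mathlib
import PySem

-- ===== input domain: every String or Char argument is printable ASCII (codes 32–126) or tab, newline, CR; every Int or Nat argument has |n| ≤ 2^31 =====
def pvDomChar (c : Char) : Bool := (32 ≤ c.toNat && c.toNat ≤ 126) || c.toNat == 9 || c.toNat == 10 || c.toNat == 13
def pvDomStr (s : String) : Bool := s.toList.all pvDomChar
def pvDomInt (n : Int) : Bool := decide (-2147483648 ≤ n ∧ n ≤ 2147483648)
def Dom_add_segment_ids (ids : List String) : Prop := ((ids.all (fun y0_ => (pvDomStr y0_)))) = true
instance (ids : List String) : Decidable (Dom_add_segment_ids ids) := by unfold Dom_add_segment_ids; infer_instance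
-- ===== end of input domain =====

-- B replaces A's token-by-token accumulator loop by a run-length construction: it first collects
-- the positions of bracketed tokens, then emits constant blocks between consecutive positions
-- (alternative decomposition, same cost).

-- ===== PORT A =====
-- the test `t[0] == '[' and t[-1] == ']'` shared by both Pythons (getD defaults are
-- unreachable under Pre_, where every token is nonempty)
def pvBracketed (s : String) : Bool :=
  ((PySem.Str.pyGet? s 0).getD ' ' == '[') && ((PySem.Str.pyGet? s (-1)).getD ' ' == ']')

def add_segment_ids (ids : List String) : List String × List Int :=
  let kg := (PySem.List.pyRange 0 (ids.length : Int) 1).foldl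
    (fun kg i =>
      if pvBracketed (PySem.List.pyGetD ids i "") then
        kg ++ [PySem.List.pyGetD kg (-1) 0 + 1]
      else
        kg ++ [PySem.List.pyGetD kg (-1) 0]) [(0 : Int)]
  (ids, PySem.List.slice kg (some 1) none)

-- ===== PORT B =====
def add_segment_ids_alt (ids : List String) : List String × List Int :=
  let n : Int := (ids.length : Int)
  let pos := (PySem.List.pyRange 0 n 1).filter (fun i => pvBracketed (PySem.List.pyGetD ids i ""))
  let r := (PySem.List.enumerate pos 0).foldl
      (fun (st : List Int × Int) kp => (st.1 ++ List.replicate (kp.2 - st.2).toNat kp.1, kp.2))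
      ([], 0)
  (ids, r.1 ++ List.replicate (n - r.2).toNat (pos.length : Int))

-- ===== PRECONDITION & SPEC =====
-- Pre_ excludes lists containing an empty-string token, on which Python A raises IndexError (t[0]).
def Pre_add_segment_ids (ids : List String) : Prop := ∀ s ∈ ids, s ≠ ""
instance (ids : List String) : Decidable (Pre_add_segment_ids ids) := by unfold Pre_add_segment_ids; infer_instance
def pvWitness_add_segment_ids : List String := ["[a]", "b", "[c]"]

def Spec_add_segment_ids (ids : List String) (out : List String × List Int) : Prop := out = add_segment_ids_alt ids
instance (ids : List String) (out : List String × List Int) : Decidable (Spec_add_segment_ids ids out) := by unfold Spec_add_segment_ids; infer_instance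

-- ===== CLAIM (what is proved, stated in full; the proofs are below) =====
def Claim_equal_add_segment_ids : Prop := ∀ (ids : List String), Dom_add_segment_ids ids → Pre_add_segment_ids ids → Spec_add_segment_ids ids (add_segment_ids ids)

-- ===== LEMMAS AND PROOFS =====

-- the common intermediate: the running segment id of each token, counter c
def pvSegs : List String → Nat → List Int
  | [], _ => []
  | s :: t, c =>
    if pvBracketed s then ((c + 1 : Nat) : Int) :: pvSegs t (c + 1)
    else ((c : Nat) : Int) :: pvSegs t c

-- positions (0-based) of the bracketed tokens
def pvPosOf : List String → List Nat
  | [] => []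
  | s :: t =>
    if pvBracketed s then 0 :: (pvPosOf t).map (· + 1) else (pvPosOf t).map (· + 1)

-- run-length picture: blocks of constant value between consecutive positions
def pvBuild : List Nat → Nat → Nat → Nat → List Int
  | [], k, prev, n => List.replicate (n - prev) ((k : Nat) : Int)
  | p :: ps, k, prev, n => List.replicate (p - prev) ((k : Nat) : Int) ++ pvBuild ps (k + 1) p n

theorem pvLast_pyGetD (kg : List Int) (c : Int) (h : kg.getLast? = some c) :
    PySem.List.pyGetD kg (-1) 0 = c := by
  have hne : kg ≠ [] := by intro he; simp [he] at h
  have hlen : 0 < kg.length := List.length_pos_iff.mpr hne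
  have := PySem.List.pyGetD_neg_natCast (xs := kg) (k := 1) (d := 0) (by omega) (by omega)
  simp at this
  rw [this, List.getLast?_eq_getElem?] at *
  simp [List.getElem?_eq_getElem (by omega : kg.length - 1 < kg.length)] at h ⊢
  exact h

-- A's loop produces kg ++ pvSegs
theorem pvLoopA (ids : List String) (kg : List Int) (c : Nat) (h : kg.getLast? = some (c : Int)) :
    ids.foldl (fun kg s =>
        if pvBracketed s then kg ++ [PySem.List.pyGetD kg (-1) 0 + 1]
        else kg ++ [PySem.List.pyGetD kg (-1) 0]) kg
      = kg ++ pvSegs ids c := by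
  induction ids generalizing kg c with
  | nil => simp [pvSegs]
  | cons s t ih =>
    simp only [List.foldl_cons, pvSegs]
    rw [pvLast_pyGetD kg (c : Int) h]
    by_cases hb : pvBracketed s
    · simp only [hb, if_true]
      have : (c : Int) + 1 = ((c + 1 : Nat) : Int) := by push_cast; ring
      rw [this, ih (kg ++ [((c + 1 : Nat) : Int)]) (c + 1) (by simp)]
      simp
    · rw [if_neg hb, if_neg hb]
      rw [ih (kg ++ [((c : Nat) : Int)]) c (by simp)]
      simp

-- the position filter over List.range is pvPosOf
theorem pvPosRange (ids : List String) :
    (List.range ids.length).filter (fun i => pvBracketed (ids.getD i "")) = pvPosOf ids := by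
  induction ids with
  | nil => simp [pvPosOf]
  | cons s t ih =>
    simp only [List.length_cons, pvPosOf]
    rw [List.range_succ_eq_map]
    by_cases hb : pvBracketed s
    · simp only [List.filter_cons, List.getD_cons_zero, hb, if_true]
      rw [List.filter_map]
      simp only [Function.comp_def, List.getD_cons_succ]
      rw [ih]
    · simp only [List.filter_cons, List.getD_cons_zero, hb]
      simp only [Bool.false_eq_true, if_false]
      rw [List.filter_map]
      simp only [Function.comp_def, List.getD_cons_succ]
      rw [ih]

-- the Int-typed position list of B's port
theorem pvPosEq (ids : List String) :
    (PySem.List.pyRange 0 (ids.length : Int) 1).filter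
        (fun i => pvBracketed (PySem.List.pyGetD ids i "")) = (pvPosOf ids).map Int.ofNat := by
  rw [PySem.List.pyRange_one]
  simp only [sub_zero, Int.toNat_natCast]
  have : (List.range ids.length).map (fun k : Nat => (0 : Int) + (k : Int))
       = (List.range ids.length).map Int.ofNat := by
    simp
  rw [this, List.filter_map]
  have : ((List.range ids.length).filter (fun i => pvBracketed (PySem.List.pyGetD ids (Int.ofNat i) "")))
       = (List.range ids.length).filter (fun i => pvBracketed (ids.getD i "")) := by
    apply List.filter_congr
    intro i _
    simp [PySem.List.pyGetD_natCast]
  rw [Function.comp_def] at *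
  rw [this, pvPosRange]

-- B's fold over the enumerated positions is the run-length build
theorem pvFoldBuild (P : List Nat) (k prev : Nat) (acc : List Int) (n : Nat) :
    (let r := (PySem.List.enumerate (P.map Int.ofNat) (k : Int)).foldl
        (fun (st : List Int × Int) kp => (st.1 ++ List.replicate (kp.2 - st.2).toNat kp.1, kp.2))
        (acc, (prev : Int));
     r.1 ++ List.replicate ((n : Int) - r.2).toNat ((k + P.length : Nat) : Int))
      = acc ++ pvBuild P k prev n := by
  induction P generalizing k prev acc with
  | nil =>
    simp only [List.map_nil, PySem.List.enumerate_nil, List.foldl_nil, pvBuild]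
    have : ((n : Int) - (prev : Int)).toNat = n - prev := by omega
    rw [this]
    simp
  | cons p ps ih =>
    simp only [List.map_cons, PySem.List.enumerate_cons, List.foldl_cons, pvBuild,
      Int.ofNat_eq_natCast, List.length_cons]
    have h1 : (((p : Nat) : Int) - (prev : Int)).toNat = p - prev := by omega
    have h2 : (k + (ps.length + 1)) = (k + 1) + ps.length := by omega
    rw [h1, h2]
    have := ih (k + 1) p (acc ++ List.replicate (p - prev) ((k : Nat) : Int))
    push_cast at this ⊢
    rw [this]
    simp

-- shifting every position and the window by one leaves the blocks unchanged
theorem pvShiftB (P : List Nat) (k prev n : Nat) :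
    pvBuild (P.map (· + 1)) k (prev + 1) (n + 1) = pvBuild P k prev n := by
  induction P generalizing k prev with
  | nil => simp [pvBuild]
  | cons p ps ih =>
    simp only [List.map_cons, pvBuild]
    rw [ih]
    congr 1
    congr 1
    omega

theorem pvMapShiftB (P : List Nat) (k n : Nat) :
    pvBuild (P.map (· + 1)) k 0 (n + 1) = ((k : Nat) : Int) :: pvBuild P k 0 n := by
  cases P with
  | nil => simp [pvBuild, List.replicate_succ]
  | cons p ps =>
    simp only [List.map_cons, pvBuild]
    rw [pvShiftB]
    have : p + 1 - 0 = (p - 0) + 1 := by omega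
    rw [this, List.replicate_succ]
    simp

theorem pvMainB (ids : List String) (k : Nat) :
    pvBuild (pvPosOf ids) k 0 ids.length = pvSegs ids k := by
  induction ids generalizing k with
  | nil => simp [pvPosOf, pvSegs, pvBuild]
  | cons s t ih =>
    simp only [pvPosOf, pvSegs, List.length_cons]
    by_cases hb : pvBracketed s
    · simp only [hb, if_true]
      show pvBuild (0 :: (pvPosOf t).map (· + 1)) k 0 (t.length + 1) = _
      simp only [pvBuild, Nat.zero_sub, List.replicate_zero, List.nil_append]
      rw [pvMapShiftB, ih]
    · rw [if_neg hb, if_neg hb]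
      rw [pvMapShiftB, ih]

-- ===== VERDICT (by name: the statement is the Claim_ definition above) =====
theorem add_segment_ids_spec : Claim_equal_add_segment_ids := by
  intro ids _ _
  unfold Spec_add_segment_ids add_segment_ids add_segment_ids_alt
  simp only []
  rw [PySem.List.foldl_pyRange_zero_pyGetD' (xs := ids) (d := "")
    (f := fun kg s =>
      if pvBracketed s then kg ++ [PySem.List.pyGetD kg (-1) 0 + 1]
      else kg ++ [PySem.List.pyGetD kg (-1) 0]) (init := [(0 : Int)])]
  rw [pvLoopA ids [0] 0 rfl]
  rw [PySem.List.slice_from_one]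
  rw [pvPosEq]
  have := pvFoldBuild (pvPosOf ids) 0 0 [] ids.length
  simp only [List.nil_append, Nat.zero_add] at this
  rw [show ((0 : Nat) : Int) = (0 : Int) from rfl] at this
  simp only [List.length_map] at *
  rw [this]
  rw [pvMainB]
  simp
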